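-- pv_equiv track=rewrite | github.com/AdibOsmany/Courses | Intro-to-Comp-Sci/homeworks/scrabble-scoring/hw2.py | func12
-- ===== SOURCE A (Python) =====
-- def func12(word, rack):
--   if word == "":
--     return True
--
--   if word[0] in rack:
--     tiger = ind(word[0], rack)
--     return func12(word[1:], (rack[0: tiger] + rack[tiger+ 1:]))
--   else:
--     return False
--
-- def ind(e, L):
--     if (L==[]) or (e==L[0]) :
--         return 0
--     else:
--         return 1+ind(e,L[1:])
-- ===== SOURCE B (Python) =====
-- def func12(word, rack):
--     cnt = {}
--     for t in rack:
--         cnt[t] = cnt.get(t, 0) + 1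
--     for c in word:
--         n = cnt.get(c, 0)
--         if n == 0:
--             return False
--         cnt[c] = n - 1
--     return True
-- ===== Notes on version B (the rewrite author's own statement) =====
-- stated objective: faster
-- what changed: Replaced A's recursion that rescans the rack (membership test + recursive ind + two slice copies per word letter) by a single pass building a tile-count dictionary and a single pass over the word decrementing counts.
import Mathlib
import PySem

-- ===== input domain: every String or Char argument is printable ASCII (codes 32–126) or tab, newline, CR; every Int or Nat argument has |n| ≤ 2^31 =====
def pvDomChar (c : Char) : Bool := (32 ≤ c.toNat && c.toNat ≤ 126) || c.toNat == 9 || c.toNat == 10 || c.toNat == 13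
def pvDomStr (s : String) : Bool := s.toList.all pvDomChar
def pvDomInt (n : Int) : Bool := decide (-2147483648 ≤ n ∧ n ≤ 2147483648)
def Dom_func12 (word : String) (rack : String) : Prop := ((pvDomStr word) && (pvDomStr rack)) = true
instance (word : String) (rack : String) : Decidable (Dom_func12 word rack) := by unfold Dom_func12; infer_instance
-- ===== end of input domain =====

-- B replaces A's per-letter rescans of the rack (membership + recursive index search + slice
-- copies) by one counting pass over the rack and one decrementing pass over the word (objective: faster).

-- ===== PORT A =====
-- helper `ind(e, L)`: first index i with e == L[i] (len(L) if absent)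
def pvInd (e : Char) (L : List Char) : Int :=
  match L with
  | [] => 0
  | x :: rest => if e = x then 0 else 1 + pvInd e rest

-- the recursion of A over the characters of `word`, rack as a char list
def pvAux : List Char → List Char → Bool
  | [], _ => true
  | c :: w, r =>
    if r.contains c then
      let tiger := pvInd c r
      pvAux w (PySem.List.slice r (some 0) (some tiger) ++ PySem.List.slice r (some (tiger + 1)) none)
    else false

def func12 (word : String) (rack : String) : Bool := pvAux word.toList rack.toList

-- ===== PORT B =====
-- `for c in word:` loop with the count dict
def pvLoop : List Char → PySem.Dict Char Int → Bool
  | [], _ => true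
  | c :: w, cnt =>
    let n := cnt.getD c 0
    if n = 0 then false else pvLoop w (cnt.insert c (n - 1))

def func12_alt (word : String) (rack : String) : Bool :=
  pvLoop word.toList
    (rack.toList.foldl (fun cnt t => cnt.insert t (cnt.getD t 0 + 1)) PySem.Dict.empty)

-- ===== PRECONDITION & SPEC =====
def Spec_func12 (word : String) (rack : String) (out : Bool) : Prop := out = func12_alt word rack
instance (word : String) (rack : String) (out : Bool) : Decidable (Spec_func12 word rack out) := by unfold Spec_func12; infer_instance

-- ===== CLAIM (what is proved, stated in full; the proofs are below) =====
def Claim_equal_func12 : Prop := ∀ (word : String) (rack : String), Dom_func12 word rack → Spec_func12 word rack (func12 word rack)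

-- ===== LEMMAS AND PROOFS =====

-- pvInd is Python's find-first-index, as a Nat cast
theorem pvInd_eq_findIdx (e : Char) (L : List Char) :
    pvInd e L = (L.findIdx (fun x => e == x) : Int) := by
  induction L with
  | nil => simp [pvInd]
  | cons x rest ih =>
    by_cases h : e = x
    · simp [pvInd, h, List.findIdx_cons]
    · have hb : (e == x) = false := by simp [h]
      simp [pvInd, h, List.findIdx_cons, ih, hb]
      ring

-- take/drop around the first ==-index is List.erase
theorem take_drop_erase (c : Char) (r : List Char) (h : c ∈ r) :
    r.take (r.findIdx (fun x => c == x)) ++ r.drop (r.findIdx (fun x => c == x) + 1) = r.erase c := by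
  induction r with
  | nil => simp at h
  | cons x rest ih =>
    by_cases hx : c = x
    · simp [hx, List.findIdx_cons, List.erase_cons_head]
    · have hmem : c ∈ rest := by
        rcases List.mem_cons.mp h with h' | h'
        · exact absurd h' hx
        · exact h'
      have hb : (c == x) = false := by simp [hx]
      have hne : (x == c) = false := by simp [Ne.symm hx]
      simp [List.findIdx_cons, hb, hne, ih hmem]

-- A's slice pair removes the first occurrence of c
theorem sliceA_eq_erase (c : Char) (r : List Char) (h : c ∈ r) :
    PySem.List.slice r (some 0) (some (pvInd c r)) ++
      PySem.List.slice r (some (pvInd c r + 1)) none = r.erase c := by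
  have hi : pvInd c r = (r.findIdx (fun x => c == x) : Int) := pvInd_eq_findIdx c r
  rw [hi]
  have h1 : PySem.List.slice r (some 0) (some ((r.findIdx (fun x => c == x) : Nat) : Int))
      = r.take (r.findIdx (fun x => c == x)) := by
    simp [PySem.List.slice_zero_start, PySem.List.slice_to_natCast]
  have h2 : PySem.List.slice r (some (((r.findIdx (fun x => c == x) : Nat) : Int) + 1)) none
      = r.drop (r.findIdx (fun x => c == x) + 1) := by
    have : ((r.findIdx (fun x => c == x) : Nat) : Int) + 1
        = ((r.findIdx (fun x => c == x) + 1 : Nat) : Int) := by push_cast; ring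
    rw [this, PySem.List.slice_from_natCast]
  rw [h1, h2]
  exact take_drop_erase c r h

-- main induction: the rack list and the count dict run in lockstep
theorem pvAux_eq_pvLoop (w : List Char) (r : List Char) (d : PySem.Dict Char Int)
    (hinv : ∀ c, d.getD c 0 = (r.count c : Int)) :
    pvAux w r = pvLoop w d := by
  induction w generalizing r d with
  | nil => rfl
  | cons c w ih =>
    by_cases hc : c ∈ r
    · have hcnt : d.getD c 0 ≠ 0 := by
        rw [hinv c]
        have := List.count_pos_iff.mpr hc
        omega
      rw [pvAux, pvLoop]
      simp only [List.contains_eq_mem, hc, decide_true, if_true, hcnt]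
      rw [sliceA_eq_erase c r hc]
      apply ih
      intro c'
      by_cases hcc : c' = c
      · rw [hcc, PySem.Dict.getD_insert_self, hinv c, List.count_erase_self]
        have := List.count_pos_iff.mpr hc
        omega
      · rw [PySem.Dict.getD_insert_of_ne _ _ _ (by simpa using hcc), hinv c',
          List.count_erase_of_ne hcc]
    · have hcnt : d.getD c 0 = 0 := by
        rw [hinv c]
        simp [List.count_eq_zero.mpr hc]
      rw [pvAux, pvLoop]
      simp [List.contains_eq_mem, hc, hcnt]

-- ===== VERDICT (by name: the statement is the Claim_ definition above) =====
theorem func12_spec : Claim_equal_func12 := by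
  intro word rack _
  unfold Spec_func12 func12 func12_alt
  apply pvAux_eq_pvLoop
  intro c
  rw [PySem.Dict.getD_foldl_insert_add_one]
  simp [PySem.Dict.getD_empty]
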